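-- pv_equiv track=rewrite | github.com/pypi-data/pypi-mirror-356 | packages/ltpylib/ltpylib-1.11.0.tar.gz/ltpylib-1.11.0/ltpylib/jenkins.py | create_recursive_tree_param
-- ===== SOURCE A (Python) =====
-- from typing import Sequence, Tuple
--
-- def create_recursive_tree_param(container: str, fields: Sequence[str], depth: int) -> str:
--   tree_param = f"{container}[{','.join(fields)}"
--   start_tree = tree_param
--   end_tree = "]"
--   for idx in range(depth):
--     start_tree += "," + tree_param
--     end_tree += "]"
--
--   return start_tree + end_tree
-- ===== SOURCE B (Python) =====
-- def create_recursive_tree_param(container, fields, depth):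
--   n = max(depth, 0)
--   level = f"{container}[{','.join(fields)}]"
--   # closed form: nest = n extra "container[fields," prefixes and n extra "]" suffixes
--   open_part = f"{container}[{','.join(fields)},"
--   return open_part * n + level + "]" * n
-- ===== Notes on version B (the rewrite author's own statement) =====
-- stated objective: simpler
-- what changed: Replaces the loop that grows parallel start_tree/end_tree strings with a loop-free closed form: the nested result is open_part * max(depth,0) + one full level + ']' * max(depth,0) using string repetition.
import Mathlib
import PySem

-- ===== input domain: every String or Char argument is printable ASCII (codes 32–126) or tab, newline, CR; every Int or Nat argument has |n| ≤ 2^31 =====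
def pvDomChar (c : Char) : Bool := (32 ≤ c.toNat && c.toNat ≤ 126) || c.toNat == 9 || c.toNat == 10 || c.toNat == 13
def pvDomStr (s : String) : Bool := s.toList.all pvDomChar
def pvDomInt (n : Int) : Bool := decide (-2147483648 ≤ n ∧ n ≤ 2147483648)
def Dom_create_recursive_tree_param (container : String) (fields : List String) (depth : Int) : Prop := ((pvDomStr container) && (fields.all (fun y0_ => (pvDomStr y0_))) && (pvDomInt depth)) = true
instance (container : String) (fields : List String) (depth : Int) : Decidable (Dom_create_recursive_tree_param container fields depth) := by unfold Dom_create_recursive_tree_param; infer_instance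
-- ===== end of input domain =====

-- B replaces A's loop growing parallel prefix/suffix strings with a loop-free closed form
-- built from string repetition (`s * n`); objective: simpler.

-- ===== PORT A =====
def create_recursive_tree_param (container : String) (fields : List String) (depth : Int) : String :=
  let tree_param := container ++ "[" ++ PySem.Str.join "," fields
  let p := (PySem.List.pyRange 0 depth 1).foldl
    (fun (st : String × String) _ => (st.1 ++ ("," ++ tree_param), st.2 ++ "]"))
    (tree_param, "]")
  p.1 ++ p.2

-- ===== PORT B =====
-- Source B's `s * n` on str is ported exactly as PySem.List.pyRepeat on the code points.
def create_recursive_tree_param_alt (container : String) (fields : List String) (depth : Int) : String :=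
  let n : Int := max depth 0
  let level := container ++ "[" ++ PySem.Str.join "," fields ++ "]"
  let open_part := container ++ "[" ++ PySem.Str.join "," fields ++ ","
  String.ofList (PySem.List.pyRepeat open_part.toList n) ++ level
    ++ String.ofList (PySem.List.pyRepeat "]".toList n)

-- ===== PRECONDITION & SPEC =====
def Spec_create_recursive_tree_param (container : String) (fields : List String) (depth : Int) (out : String) : Prop := out = create_recursive_tree_param_alt container fields depth
instance (container : String) (fields : List String) (depth : Int) (out : String) : Decidable (Spec_create_recursive_tree_param container fields depth out) := by unfold Spec_create_recursive_tree_param; infer_instance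

-- ===== CLAIM (what is proved, stated in full; the proofs are below) =====
def Claim_equal_create_recursive_tree_param : Prop := ∀ (container : String) (fields : List String) (depth : Int), Dom_create_recursive_tree_param container fields depth → Spec_create_recursive_tree_param container fields depth (create_recursive_tree_param container fields depth)

-- ===== LEMMAS AND PROOFS =====

-- n concatenated copies of x
def pvRep (x : String) : Nat → String
  | 0 => ""
  | n + 1 => x ++ pvRep x n

-- A's loop, over any index list (the index is unused), in closed form
theorem pvFoldA (T : String) (l : List Int) (s e : String) :
    l.foldl (fun (st : String × String) _ => (st.1 ++ ("," ++ T), st.2 ++ "]")) (s, e)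
      = (s ++ pvRep ("," ++ T) l.length, e ++ pvRep "]" l.length) := by
  induction l generalizing s e with
  | nil => simp [pvRep]
  | cons a t ih =>
      simp only [List.foldl_cons, List.length_cons, ih]
      simp [pvRep, String.append_assoc]

-- Python `s * n` as the pvRep of the proofs
theorem pvOfList_flatten_replicate (s : String) : ∀ (m : Nat),
    String.ofList ((List.replicate m s.toList).flatten) = pvRep s m
  | 0 => by simp [pvRep]
  | m + 1 => by simp [List.replicate_succ, pvRep, pvOfList_flatten_replicate s m]

theorem pvOfList_pyRepeat (s : String) (n : Int) :
    String.ofList (PySem.List.pyRepeat s.toList n) = pvRep s n.toNat := by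
  unfold PySem.List.pyRepeat
  exact pvOfList_flatten_replicate s n.toNat

-- rotating the repeated block past one copy of the level string
theorem pvRotate (c J rest : String) (m : Nat) :
    pvRep (c ++ ("[" ++ (J ++ ","))) m ++ (c ++ ("[" ++ (J ++ rest)))
      = c ++ ("[" ++ (J ++ (pvRep ("," ++ (c ++ ("[" ++ J))) m ++ rest))) := by
  induction m generalizing rest with
  | zero => simp [pvRep]
  | succ m ih => simp only [pvRep, String.append_assoc, ih]

-- ===== VERDICT (by name: the statement is the Claim_ definition above) =====
theorem create_recursive_tree_param_spec : Claim_equal_create_recursive_tree_param := by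
  intro container fields depth _
  unfold Spec_create_recursive_tree_param create_recursive_tree_param create_recursive_tree_param_alt
  have hmax : (max depth 0).toNat = depth.toNat := by omega
  simp only [pvFoldA, PySem.List.length_pyRange_one, Int.sub_zero, pvOfList_pyRepeat, hmax,
    String.append_assoc]
  rw [pvRotate]
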